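-- pv_equiv track=rewrite | github.com/Sisyphus235/tech_lab | algorithm/array/lc80_remove_duplicates_from_sorted_array_II.py | remove_duplicates_count
-- ===== SOURCE A (Python) =====
-- from typing import List
--
-- MOST = 2
--
-- def remove_duplicates_count(nums: List[int]) -> int:
--     length = len(nums)
--     if length < 3:
--         return length
--     cur = 1
--     count = 2 if nums[cur] == nums[cur - 1] else 1
--     cur += 1
--     pre = cur
--     while cur < length:
--         if nums[cur] == nums[pre - 1]:
--             if count != MOST:
--                 count += 1
--                 nums[pre] = nums[cur]
--                 pre += 1
--         else:
--             count = 1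
--             nums[pre] = nums[cur]
--             pre += 1
--         cur += 1
--     nums[:] = nums[:pre]
--     return pre
-- ===== SOURCE B (Python) =====
-- from typing import List
--
-- def remove_duplicates_count(nums: List[int]) -> int:
--     # Single pass building the kept prefix: keep x unless it equals both of the
--     # last two kept values (i.e. allow at most two consecutive equal elements).
--     kept = []
--     for x in nums:
--         if len(kept) < 2 or not (x == kept[-1] == kept[-2]):
--             kept.append(x)
--     nums[:] = kept
--     return len(kept)
-- ===== Notes on version B (the rewrite author's own statement) =====
-- stated objective: simpler
-- what changed: Replaces A's two-pointer in-place compaction with explicit count state and a length<3 special case by a single pass that builds the kept prefix list, appending x unless it equals both of the last two kept values; same mutation of nums is performed.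
import Mathlib
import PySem

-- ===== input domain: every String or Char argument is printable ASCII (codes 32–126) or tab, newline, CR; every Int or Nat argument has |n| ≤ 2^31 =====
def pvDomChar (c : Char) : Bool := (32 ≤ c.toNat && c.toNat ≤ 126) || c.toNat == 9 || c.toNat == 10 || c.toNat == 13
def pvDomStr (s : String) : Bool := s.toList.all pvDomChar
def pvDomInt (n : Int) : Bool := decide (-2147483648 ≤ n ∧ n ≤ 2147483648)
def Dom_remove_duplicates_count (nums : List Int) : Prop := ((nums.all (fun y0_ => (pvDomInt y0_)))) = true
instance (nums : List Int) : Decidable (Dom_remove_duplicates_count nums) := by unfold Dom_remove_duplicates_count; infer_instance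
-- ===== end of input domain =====

-- B builds the kept prefix in one pass instead of A's two-pointer/count compaction;
-- both mutate nums in Python, the theorem is about the returned count.

-- ===== PORT A =====
-- A's while-loop over (arr, count, pre, cur); the array mutation nums[pre] = nums[cur]
-- becomes List.set. All index accesses are in range in A, so getD is exact here.
def aLoop (arr : List Int) (count pre cur : Nat) : Nat :=
  if h : cur < arr.length then
    if arr.getD cur 0 = arr.getD (pre - 1) 0 then
      if count ≠ 2 then
        aLoop (arr.set pre (arr.getD cur 0)) (count + 1) (pre + 1) (cur + 1)
      else
        aLoop arr count pre (cur + 1)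
    else
      aLoop (arr.set pre (arr.getD cur 0)) 1 (pre + 1) (cur + 1)
  else pre
termination_by arr.length - cur
decreasing_by all_goals (try simp [List.length_set]); all_goals omega

def remove_duplicates_count (nums : List Int) : Int :=
  let length := nums.length
  if length < 3 then (length : Int)
  else
    let count : Nat := if nums.getD 1 0 = nums.getD 0 0 then 2 else 1
    ((aLoop nums count 2 2 : Nat) : Int)

-- ===== PORT B =====
-- one step of B's loop: append x unless it equals both of the last two kept values
def bStep (kept : List Int) (x : Int) : List Int :=
  if kept.length < 2 ∨ ¬(x = kept.getD (kept.length - 1) 0 ∧ x = kept.getD (kept.length - 2) 0)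
  then kept ++ [x] else kept

def remove_duplicates_count_alt (nums : List Int) : Int :=
  ((nums.foldl bStep []).length : Int)

-- ===== PRECONDITION & SPEC =====
def Spec_remove_duplicates_count (nums : List Int) (out : Int) : Prop := out = remove_duplicates_count_alt nums
instance (nums : List Int) (out : Int) : Decidable (Spec_remove_duplicates_count nums out) := by unfold Spec_remove_duplicates_count; infer_instance

-- ===== CLAIM (what is proved, stated in full; the proofs are below) =====
def Claim_equal_remove_duplicates_count : Prop := ∀ (nums : List Int), Dom_remove_duplicates_count nums → Spec_remove_duplicates_count nums (remove_duplicates_count nums)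

-- ===== LEMMAS AND PROOFS =====

-- abstract common loop: how many of l get kept, given the last kept value and the run count
def pureLoop (last : Int) (count : Nat) (l : List Int) : Nat :=
  match l with
  | [] => 0
  | x :: xs =>
    if x = last then
      if count ≠ 2 then 1 + pureLoop x (count + 1) xs else pureLoop last count xs
    else 1 + pureLoop x 1 xs

lemma aLoop_eq (fuel : Nat) : ∀ (arr : List Int) (count pre cur : Nat),
    arr.length - cur ≤ fuel → 1 ≤ pre → pre ≤ cur →
    aLoop arr count pre cur = pre + pureLoop (arr.getD (pre - 1) 0) count (arr.drop cur) := by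
  induction fuel with
  | zero =>
    intro arr count pre cur hf _ _
    rw [aLoop]
    have hle : arr.length ≤ cur := by omega
    simp [Nat.not_lt.mpr hle, List.drop_eq_nil_of_le hle, pureLoop]
  | succ n ih =>
    intro arr count pre cur hf h1 h2
    rw [aLoop]
    by_cases h : cur < arr.length
    · rw [dif_pos h]
      have hdrop : arr.drop cur = arr.getD cur 0 :: arr.drop (cur + 1) := by
        rw [List.getD_eq_getElem arr 0 h, List.drop_eq_getElem_cons h]
      have hpre : pre < arr.length := by omega
      have hsetdrop : ∀ v : Int, (arr.set pre v).drop (cur + 1) = arr.drop (cur + 1) := by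
        intro v
        apply List.ext_getElem
        · simp
        · intro i hi _
          simp only [List.getElem_drop, List.getElem_set]
          have : pre ≠ cur + 1 + i := by omega
          simp [this]
      have hsetget : ∀ v : Int, (arr.set pre v).getD pre 0 = v := by
        intro v
        rw [List.getD_eq_getElem _ 0 (by simp [List.length_set]; omega)]
        simp
      have hpp : pre + 1 - 1 = pre := by omega
      by_cases heq : arr.getD cur 0 = arr.getD (pre - 1) 0
      · rw [if_pos heq]
        by_cases hc : count ≠ 2
        · rw [if_pos hc]
          rw [ih _ _ _ _ (by simp [List.length_set]; omega) (by omega) (by omega)]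
          rw [hsetdrop, hpp, hsetget]
          conv_rhs => rw [hdrop, pureLoop]
          rw [if_pos heq, if_pos hc, heq]
          omega
        · rw [if_neg hc]
          rw [ih _ _ _ _ (by omega) h1 (by omega)]
          conv_rhs => rw [hdrop, pureLoop]
          rw [if_pos heq, if_neg hc]
      · rw [if_neg heq]
        rw [ih _ _ _ _ (by simp [List.length_set]; omega) (by omega) (by omega)]
        rw [hsetdrop, hpp, hsetget]
        conv_rhs => rw [hdrop, pureLoop]
        rw [if_neg heq]
        omega
    · rw [dif_neg h]
      have hle : arr.length ≤ cur := by omega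
      simp [List.drop_eq_nil_of_le hle, pureLoop]

-- B's fold equals the abstract loop, under the invariant linking count with the last two kept values
lemma bFold_eq : ∀ (l : List Int) (kept : List Int) (count : Nat),
    2 ≤ kept.length →
    (count = 1 ∨ count = 2) →
    (count = 2 ↔ kept.getD (kept.length - 1) 0 = kept.getD (kept.length - 2) 0) →
    (l.foldl bStep kept).length
      = kept.length + pureLoop (kept.getD (kept.length - 1) 0) count l := by
  intro l
  induction l with
  | nil => intro kept count _ _ _; simp [pureLoop]
  | cons x xs ih =>
    intro kept count h2 hc hiff
    set last := kept.getD (kept.length - 1) 0 with hlast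
    set s2 := kept.getD (kept.length - 2) 0 with hs2
    have hk1 : (kept ++ [x]).getD ((kept ++ [x]).length - 1) 0 = x := by
      rw [List.getD_eq_getElem _ 0 (by simp)]
      simp
    have hk2 : (kept ++ [x]).getD ((kept ++ [x]).length - 2) 0 = last := by
      rw [List.getD_eq_getElem _ 0 (by simp)]
      have hidx : (kept ++ [x]).length - 2 = kept.length - 1 := by simp
      have hlt : kept.length - 1 < kept.length := by omega
      rw [hlast, List.getD_eq_getElem _ 0 (by omega)]
      simp only [hidx]
      rw [List.getElem_append_left hlt]
    simp only [List.foldl_cons]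
    by_cases hskip : x = last ∧ x = s2
    · -- both programs skip
      have hcount : count = 2 := by
        rcases hc with h1 | h1
        · exfalso
          have hne : ¬ (last = s2) := by
            intro hls; exact absurd (hiff.mpr hls) (by omega)
          exact hne (hskip.1 ▸ hskip.2 ▸ rfl)
        · exact h1
      have hb : bStep kept x = kept := by
        unfold bStep
        rw [if_neg]
        push_neg
        exact ⟨by omega, ⟨hskip.1, hskip.2⟩⟩
      rw [hb, ih kept count h2 hc hiff, ← hlast]
      congr 1
      symm
      rw [pureLoop, if_pos hskip.1, hcount]
      simp
    · -- both programs keep x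
      have hb : bStep kept x = kept ++ [x] := by
        unfold bStep
        rw [if_pos]
        right
        intro hand
        exact hskip ⟨hand.1, hand.2⟩
      rw [hb]
      by_cases hx : x = last
      · -- x = last, x ≠ s2, so count = 1 and becomes 2
        have hs2ne : x ≠ s2 := fun h => hskip ⟨hx, h⟩
        have hcount : count = 1 := by
          rcases hc with h1 | h1
          · exact h1
          · exact absurd (hx.trans (hiff.mp h1)) hs2ne
        have hiff2 : (2 : Nat) = 2 ↔ (kept ++ [x]).getD ((kept ++ [x]).length - 1) 0 = (kept ++ [x]).getD ((kept ++ [x]).length - 2) 0 := by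
          rw [hk1, hk2]
          exact ⟨fun _ => hx, fun _ => rfl⟩
        rw [ih (kept ++ [x]) 2 (by simp; omega) (Or.inr rfl) hiff2, hk1]
        rw [pureLoop, if_pos hx, hcount]
        simp
        omega
      · -- x ≠ last: keep, count resets to 1
        have hiff1 : (1 : Nat) = 2 ↔ (kept ++ [x]).getD ((kept ++ [x]).length - 1) 0 = (kept ++ [x]).getD ((kept ++ [x]).length - 2) 0 := by
          rw [hk1, hk2]
          exact ⟨fun h => absurd h (by omega), fun h => absurd h hx⟩
        rw [ih (kept ++ [x]) 1 (by simp; omega) (Or.inl rfl) hiff1, hk1]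
        rw [pureLoop, if_neg hx]
        simp
        omega

-- ===== VERDICT (by name: the statement is the Claim_ definition above) =====
theorem remove_duplicates_count_spec : Claim_equal_remove_duplicates_count := by
  intro nums _
  unfold Spec_remove_duplicates_count remove_duplicates_count remove_duplicates_count_alt
  match nums with
  | [] => simp [bStep]
  | [a] => simp [bStep]
  | [a, b] => simp [bStep]
  | a :: b :: c :: t =>
    have hlen : ¬ ((a :: b :: c :: t).length < 3) := by simp
    simp only [hlen, if_neg]
    have hfold : (a :: b :: c :: t).foldl bStep [] = (c :: t).foldl bStep [a, b] := by
      simp [bStep]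
    rw [hfold]
    have hget1 : (a :: b :: c :: t : List Int).getD 1 0 = b := by simp [List.getD]
    have hget0 : (a :: b :: c :: t : List Int).getD 0 0 = a := by simp [List.getD]
    set count : Nat := if (a :: b :: c :: t : List Int).getD 1 0 = (a :: b :: c :: t : List Int).getD 0 0 then 2 else 1 with hcdef
    have hc12 : count = 1 ∨ count = 2 := by
      rw [hcdef]; split <;> simp
    have hiff : count = 2 ↔ ([a, b] : List Int).getD (([a, b] : List Int).length - 1) 0 = ([a, b] : List Int).getD (([a, b] : List Int).length - 2) 0 := by
      rw [hcdef, hget1, hget0]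
      simp [List.getD]
    rw [bFold_eq (c :: t) [a, b] count (by simp) hc12 hiff]
    rw [aLoop_eq ((a :: b :: c :: t).length - 2) _ _ _ _ (le_refl _) (by omega) (le_refl _)]
    have hsame : ((a :: b :: c :: t : List Int)).getD (2 - 1) 0 = ([a, b] : List Int).getD (([a, b] : List Int).length - 1) 0 := by
      simp [List.getD]
    rw [hsame]
    simp
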